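-- pv_equiv track=rewrite | github.com/Trisconta/jdb | src/packages/jdba/txcfile.py | info_from_content
-- ===== SOURCE A (Python) =====
-- def info_from_content(blocks, max_line=40) -> str:
--     if not blocks:
--         return ""
--     last = blocks[-1]
--     if isinstance(last, list):
--         return info_from_content(last, max_line) if last else ""
--     if max_line <= 0:
--         return last
--     if len(last) > max_line:
--         return last[:max_line] + "..."
--     return last
-- ===== SOURCE B (Python) =====
-- def info_from_content(blocks, max_line=40) -> str:
--     preview = ""
--     for item in blocks:
--         if isinstance(item, list):
--             preview = info_from_content(item, max_line)
--         elif 0 < max_line < len(item):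
--             preview = item[:max_line] + "..."
--         else:
--             preview = item
--     return preview
-- ===== Notes on version B (the rewrite author's own statement) =====
-- stated objective: alternative
-- what changed: Replaces A's recursion with direct last-element indexing by a single left-to-right pass that folds every element through one formatting step into an accumulator, returning the last formatted value.
import Mathlib
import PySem

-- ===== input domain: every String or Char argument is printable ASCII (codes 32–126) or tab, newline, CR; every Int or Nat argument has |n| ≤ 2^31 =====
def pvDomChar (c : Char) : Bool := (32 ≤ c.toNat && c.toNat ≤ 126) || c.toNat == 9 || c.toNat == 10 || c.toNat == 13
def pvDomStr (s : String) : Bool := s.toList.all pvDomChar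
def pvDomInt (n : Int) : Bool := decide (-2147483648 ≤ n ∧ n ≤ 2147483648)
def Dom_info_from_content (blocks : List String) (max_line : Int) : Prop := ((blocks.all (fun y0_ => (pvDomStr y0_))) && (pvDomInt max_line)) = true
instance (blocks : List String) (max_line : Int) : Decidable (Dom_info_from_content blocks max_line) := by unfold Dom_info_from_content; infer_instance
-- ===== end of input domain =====

-- B replaces A's direct last-element indexing by a single left-to-right pass that
-- folds every element through one formatting step into an accumulator (alternative).

-- ===== PORT A =====
-- Literal port of A. Elements of `blocks` are strings in this typed setting, so the
-- `isinstance(last, list)` branch is always False and is omitted.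
def info_from_content (blocks : List String) (max_line : Int) : String :=
  if blocks = [] then ""
  else
    match PySem.List.pyGet? blocks (-1) with
    | none => ""   -- unreachable: blocks ≠ []
    | some last =>
      if max_line ≤ 0 then last
      else if (PySem.Str.len last : Int) > max_line then
        PySem.Str.slice last none (some max_line) ++ "..."
      else last

-- ===== PORT B =====
-- Port of B: the loop body formatting one item (the isinstance branch cannot fire
-- on a typed List String and is omitted), folded over the list with accumulator "".
def fmtItem (max_line : Int) (item : String) : String :=
  if 0 < max_line ∧ max_line < (PySem.Str.len item : Int) then
    PySem.Str.slice item none (some max_line) ++ "..."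
  else item

def info_from_content_alt (blocks : List String) (max_line : Int) : String :=
  blocks.foldl (fun _ item => fmtItem max_line item) ""

-- ===== PRECONDITION & SPEC =====
def Spec_info_from_content (blocks : List String) (max_line : Int) (out : String) : Prop := out = info_from_content_alt blocks max_line
instance (blocks : List String) (max_line : Int) (out : String) : Decidable (Spec_info_from_content blocks max_line out) := by unfold Spec_info_from_content; infer_instance

-- ===== CLAIM (what is proved, stated in full; the proofs are below) =====
def Claim_equal_info_from_content : Prop := ∀ (blocks : List String) (max_line : Int), Dom_info_from_content blocks max_line → Spec_info_from_content blocks max_line (info_from_content blocks max_line)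

-- ===== LEMMAS AND PROOFS =====
theorem foldl_const_last {α β : Type} (f : α → β) (blocks : List α) (last : α)
    (h : blocks.getLast? = some last) :
    ∀ init : β, blocks.foldl (fun _ item => f item) init = f last := by
  induction blocks with
  | nil => simp at h
  | cons x xs ih =>
    intro init
    cases hx : xs.getLast? with
    | none =>
      have : xs = [] := List.getLast?_eq_none_iff.mp hx
      subst this
      simp at h ⊢
      simp [h]
    | some l =>
      have : (x :: xs).getLast? = some l := by
        rw [List.getLast?_cons, hx]; rfl
      rw [this] at h
      obtain rfl : l = last := by injection h
      simpa using ih hx (f x)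

-- ===== VERDICT (by name: the statement is the Claim_ definition above) =====
theorem info_from_content_spec : Claim_equal_info_from_content := by
  intro blocks max_line _
  unfold Spec_info_from_content info_from_content info_from_content_alt
  by_cases h : blocks = []
  · subst h; simp
  · have hl : ∃ last, blocks.getLast? = some last := by
      cases hg : blocks.getLast? with
      | none => exact absurd (List.getLast?_eq_none_iff.mp hg) h
      | some l => exact ⟨l, rfl⟩
    obtain ⟨last, hg⟩ := hl
    rw [foldl_const_last (fmtItem max_line) blocks last hg]
    rw [PySem.List.pyGet?_neg_one, hg]
    simp only [h, if_false]
    unfold fmtItem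
    by_cases h1 : max_line ≤ 0
    · rw [if_pos h1, if_neg (by omega)]
    · by_cases h2 : (PySem.Str.len last : Int) > max_line
      · rw [if_neg h1, if_pos h2, if_pos ⟨by omega, by omega⟩]
      · rw [if_neg h1, if_neg h2, if_neg (by omega)]
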